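-- pv_equiv track=rewrite | github.com/uio-bmi/track_rand | lib/hb/quick/webtools/restricted/ScreenTwoTrackCollectionsAgainstEachOther2LevelDepthCutCube.py | calculateTextToExCube
-- ===== SOURCE A (Python) =====
-- def calculateTextToExCube(folderValue1Unique, divNum, divExNum, ifFirst=0, divNumEx=0):
--     divFolderValue1Unique=""
--     i=0
--     for cutFv1U in folderValue1Unique:
--         if i < 4:
--             if i==0 and ifFirst == 1:
--                 divFolderValue1Unique+="<div class='face"+str(divNumEx) + "'>"+ str(cutFv1U[:15]).replace(" ",'&nbsp;') + "..." + "</div>"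
--             else:
--                 divFolderValue1Unique+="<div class='face"+str(divNum) + "'>"+ str(cutFv1U[:15]).replace(" ",'&nbsp;') + "..." + "</div>"
--             if len(folderValue1Unique)<4:
--                 if i != len(folderValue1Unique)-1:
--                     divFolderValue1Unique+="<div class='line"+str(divNum) + "'></div>"
--             else:
--                 if i != 3:
--                     divFolderValue1Unique+="<div class='line"+str(divNum) + "'></div>"
--         i+=1
--     if ifFirst == 0:
--         divFolderValue1Unique+="<div class='line"+str(divExNum) + "'></div>"
--     return str(divFolderValue1Unique)
-- ===== SOURCE B (Python) =====
-- def calculateTextToExCube(folderValue1Unique, divNum, divExNum, ifFirst=0, divNumEx=0):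
--     def go(xs, k, cls):
--         if k == 0 or not xs:
--             return ""
--         head = ("<div class='face" + str(cls) + "'>"
--                 + str(xs[0][:15]).replace(" ", '&nbsp;') + "...</div>")
--         tail = go(xs[1:], k - 1, divNum)
--         if tail:
--             return head + "<div class='line" + str(divNum) + "'></div>" + tail
--         return head
--     out = go(folderValue1Unique, 4, divNumEx if ifFirst == 1 else divNum)
--     if ifFirst == 0:
--         out += "<div class='line" + str(divExNum) + "'></div>"
--     return out
-- ===== Notes on version B (the rewrite author's own statement) =====
-- stated objective: alternative
-- what changed: Replaces A's whole-list counter loop with len<4 / i!=3 / i!=len-1 separator branching by a budgeted recursive renderer go(xs, k, cls) that emits at most k=4 faces, inserting a separator exactly when the recursive tail rendered something, then appends the trailing line div when ifFirst==0.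
import Mathlib
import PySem

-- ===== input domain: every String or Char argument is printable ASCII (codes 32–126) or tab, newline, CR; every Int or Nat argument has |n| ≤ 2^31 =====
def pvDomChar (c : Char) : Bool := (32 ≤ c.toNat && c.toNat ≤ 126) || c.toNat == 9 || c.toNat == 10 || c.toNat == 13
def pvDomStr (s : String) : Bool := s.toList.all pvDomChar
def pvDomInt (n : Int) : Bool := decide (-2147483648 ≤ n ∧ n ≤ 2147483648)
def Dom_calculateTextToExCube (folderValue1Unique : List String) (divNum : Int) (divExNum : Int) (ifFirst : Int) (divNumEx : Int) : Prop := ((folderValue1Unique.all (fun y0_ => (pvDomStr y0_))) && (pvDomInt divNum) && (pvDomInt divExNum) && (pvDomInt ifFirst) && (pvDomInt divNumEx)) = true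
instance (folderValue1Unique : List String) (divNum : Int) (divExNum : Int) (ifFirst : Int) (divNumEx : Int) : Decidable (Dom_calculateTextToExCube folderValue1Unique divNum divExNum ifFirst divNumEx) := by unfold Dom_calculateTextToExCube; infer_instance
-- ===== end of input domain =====

-- B replaces A's whole-list counter loop (with its len<4 / i!=3 / i!=len-1 separator branching)
-- by a budgeted recursive renderer go(xs, k, cls) emitting at most 4 faces, inserting a
-- separator exactly when its recursive tail rendered something (objective: alternative).

-- ===== PORT A =====
-- A-side helper: the body of A's for-loop (m = len(folderValue1Unique); acc = (divFolderValue1Unique, i))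
def pvAStep (m divNum ifFirst divNumEx : Int) (acc : String × Int) (cut : String) : String × Int :=
  if acc.2 < 4 then
    let d1 :=
      if acc.2 = 0 ∧ ifFirst = 1 then
        acc.1 ++ "<div class='face" ++ PySem.Int.toStr divNumEx ++ "'>" ++
          PySem.Str.replace (PySem.Str.slice cut none (some 15)) " " "&nbsp;" ++ "..." ++ "</div>"
      else
        acc.1 ++ "<div class='face" ++ PySem.Int.toStr divNum ++ "'>" ++
          PySem.Str.replace (PySem.Str.slice cut none (some 15)) " " "&nbsp;" ++ "..." ++ "</div>"
    let d2 :=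
      if m < 4 then
        (if acc.2 ≠ m - 1 then d1 ++ "<div class='line" ++ PySem.Int.toStr divNum ++ "'></div>" else d1)
      else
        (if acc.2 ≠ 3 then d1 ++ "<div class='line" ++ PySem.Int.toStr divNum ++ "'></div>" else d1)
    (d2, acc.2 + 1)
  else (acc.1, acc.2 + 1)

def calculateTextToExCube (folderValue1Unique : List String) (divNum : Int) (divExNum : Int) (ifFirst : Int) (divNumEx : Int) : String :=
  let r := folderValue1Unique.foldl
    (pvAStep (folderValue1Unique.length : Int) divNum ifFirst divNumEx) ("", 0)
  if ifFirst = 0 then r.1 ++ "<div class='line" ++ PySem.Int.toStr divExNum ++ "'></div>" else r.1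

-- ===== PORT B =====
-- B's helper go(xs, k, cls): the budget k only ever takes the values 4..0, so it is a Nat
-- fuel here; Python's xs[1:] on a nonempty list is exactly the structural tail, and
-- Python's truthiness test `if tail:` on a string is `tail ≠ ""`.
def pvGo (divNum : Int) : List String → Nat → Int → String
  | _, 0, _ => ""
  | [], _, _ => ""
  | x :: xs, Nat.succ k, cls =>
      let head := "<div class='face" ++ PySem.Int.toStr cls ++ "'>" ++
        PySem.Str.replace (PySem.Str.slice x none (some 15)) " " "&nbsp;" ++ "...</div>"
      let tail := pvGo divNum xs k divNum
      if tail ≠ "" then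
        head ++ "<div class='line" ++ PySem.Int.toStr divNum ++ "'></div>" ++ tail
      else head

def calculateTextToExCube_alt (folderValue1Unique : List String) (divNum : Int) (divExNum : Int) (ifFirst : Int) (divNumEx : Int) : String :=
  let out := pvGo divNum folderValue1Unique 4 (if ifFirst = 1 then divNumEx else divNum)
  if ifFirst = 0 then out ++ "<div class='line" ++ PySem.Int.toStr divExNum ++ "'></div>" else out

-- ===== PRECONDITION & SPEC =====
def Spec_calculateTextToExCube (folderValue1Unique : List String) (divNum : Int) (divExNum : Int) (ifFirst : Int) (divNumEx : Int) (out : String) : Prop := out = calculateTextToExCube_alt folderValue1Unique divNum divExNum ifFirst divNumEx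
instance (folderValue1Unique : List String) (divNum : Int) (divExNum : Int) (ifFirst : Int) (divNumEx : Int) (out : String) : Decidable (Spec_calculateTextToExCube folderValue1Unique divNum divExNum ifFirst divNumEx out) := by unfold Spec_calculateTextToExCube; infer_instance

-- ===== CLAIM (what is proved, stated in full; the proofs are below) =====
def Claim_equal_calculateTextToExCube : Prop := ∀ (folderValue1Unique : List String) (divNum : Int) (divExNum : Int) (ifFirst : Int) (divNumEx : Int), Dom_calculateTextToExCube folderValue1Unique divNum divExNum ifFirst divNumEx → Spec_calculateTextToExCube folderValue1Unique divNum divExNum ifFirst divNumEx (calculateTextToExCube folderValue1Unique divNum divExNum ifFirst divNumEx)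

-- ===== LEMMAS AND PROOFS =====

-- A's loop body always increments the counter by one
lemma pvFold_snd (m p q r : Int) (ys : List String) : ∀ (acc : String × Int),
    (ys.foldl (pvAStep m p q r) acc).2 = acc.2 + ys.length := by
  induction ys with
  | nil => intro acc; simp
  | cons y ys ih =>
      intro acc
      have hstep : (pvAStep m p q r acc y).2 = acc.2 + 1 := by
        simp only [pvAStep]; split_ifs <;> rfl
      simp only [List.foldl_cons, List.length_cons]
      rw [ih, hstep]
      push_cast
      omega

-- once the counter has reached 4, A's loop never changes the accumulated string again
lemma pvAStep_inert (m p q r : Int) (ys : List String) : ∀ (acc : String × Int), 4 ≤ acc.2 →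
    (ys.foldl (pvAStep m p q r) acc).1 = acc.1 := by
  induction ys with
  | nil => intro acc _; rfl
  | cons y ys ih =>
      intro acc h
      have hstep : pvAStep m p q r acc y = (acc.1, acc.2 + 1) := by
        simp [pvAStep, if_neg (show ¬ acc.2 < 4 by omega)]
      rw [List.foldl_cons, hstep, ih (acc.1, acc.2 + 1) (show (4:Int) ≤ acc.2 + 1 by omega)]

-- hence A's accumulated string only depends on the first four elements
lemma foldA_take (m p q r : Int) (xs : List String) (h4 : 4 ≤ xs.length) :
    (xs.foldl (pvAStep m p q r) ("", 0)).1 = ((xs.take 4).foldl (pvAStep m p q r) ("", 0)).1 := by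
  conv_lhs => rw [← List.take_append_drop 4 xs]
  rw [List.foldl_append]
  apply pvAStep_inert
  rw [pvFold_snd]
  simp only [List.length_take]
  omega

-- A writes "..." and "</div>" as two literals where B writes one
lemma pvDots : ("..." : String).toList ++ ("</div>" : String).toList = ("...</div>" : String).toList := rfl

lemma pvDots' (l : List Char) :
    ("..." : String).toList ++ (("</div>" : String).toList ++ l) = ("...</div>" : String).toList ++ l := by
  rw [← List.append_assoc, pvDots]

-- evaluation lemmas for B's renderer
lemma pvGo_zero (d : Int) (xs : List String) (cls : Int) : pvGo d xs 0 cls = "" := by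
  cases xs <;> rfl

lemma pvGo_nil (d : Int) (k : Nat) (cls : Int) : pvGo d [] k cls = "" := by
  cases k <;> rfl

lemma pvAppend_ne (s t : String) (h : s ≠ "") : s ++ t ≠ "" := by
  intro h2; apply h
  have := congrArg String.toList h2
  simp at this
  exact String.toList_inj.mp (by simp [this.1])

lemma pvGo_cons_ne (d : Int) (x : String) (xs : List String) (k : Nat) (cls : Int) :
    pvGo d (x :: xs) (k + 1) cls ≠ "" := by
  simp only [pvGo]
  split_ifs with h
  · (repeat apply pvAppend_ne); decide
  · (repeat apply pvAppend_ne); decide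

lemma pvGo_single (d cls : Int) (x : String) (k : Nat) :
    pvGo d [x] (k + 1) cls =
      "<div class='face" ++ PySem.Int.toStr cls ++ "'>" ++
        PySem.Str.replace (PySem.Str.slice x none (some 15)) " " "&nbsp;" ++ "...</div>" := by
  simp [pvGo, pvGo_nil]

lemma pvGo_one (d cls : Int) (x : String) (xs : List String) :
    pvGo d (x :: xs) 1 cls =
      "<div class='face" ++ PySem.Int.toStr cls ++ "'>" ++
        PySem.Str.replace (PySem.Str.slice x none (some 15)) " " "&nbsp;" ++ "...</div>" := by
  simp [pvGo, pvGo_zero]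

lemma pvGo_cons₂ (d cls : Int) (x y : String) (xs : List String) (k : Nat) :
    pvGo d (x :: y :: xs) (k + 2) cls =
      ("<div class='face" ++ PySem.Int.toStr cls ++ "'>" ++
        PySem.Str.replace (PySem.Str.slice x none (some 15)) " " "&nbsp;" ++ "...</div>") ++
      "<div class='line" ++ PySem.Int.toStr d ++ "'></div>" ++ pvGo d (y :: xs) (k + 1) d := by
  have hne := pvGo_cons_ne d y xs k d
  conv_lhs => rw [pvGo]
  rw [if_pos hne]

-- budget-4 instances used by the case split (4 = 2+2, 3 = 1+2, 2 = 0+2, 4 = 3+1, 3 = 2+1, 2 = 1+1)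
lemma pvGoS4 (d cls : Int) (x : String) : pvGo d [x] 4 cls =
    "<div class='face" ++ PySem.Int.toStr cls ++ "'>" ++
      PySem.Str.replace (PySem.Str.slice x none (some 15)) " " "&nbsp;" ++ "...</div>" :=
  pvGo_single d cls x 3
lemma pvGoS3 (d cls : Int) (x : String) : pvGo d [x] 3 cls =
    "<div class='face" ++ PySem.Int.toStr cls ++ "'>" ++
      PySem.Str.replace (PySem.Str.slice x none (some 15)) " " "&nbsp;" ++ "...</div>" :=
  pvGo_single d cls x 2
lemma pvGoS2 (d cls : Int) (x : String) : pvGo d [x] 2 cls =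
    "<div class='face" ++ PySem.Int.toStr cls ++ "'>" ++
      PySem.Str.replace (PySem.Str.slice x none (some 15)) " " "&nbsp;" ++ "...</div>" :=
  pvGo_single d cls x 1
lemma pvGoC4 (d cls : Int) (x y : String) (xs : List String) : pvGo d (x :: y :: xs) 4 cls =
    ("<div class='face" ++ PySem.Int.toStr cls ++ "'>" ++
      PySem.Str.replace (PySem.Str.slice x none (some 15)) " " "&nbsp;" ++ "...</div>") ++
    "<div class='line" ++ PySem.Int.toStr d ++ "'></div>" ++ pvGo d (y :: xs) 3 d :=
  pvGo_cons₂ d cls x y xs 2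
lemma pvGoC3 (d cls : Int) (x y : String) (xs : List String) : pvGo d (x :: y :: xs) 3 cls =
    ("<div class='face" ++ PySem.Int.toStr cls ++ "'>" ++
      PySem.Str.replace (PySem.Str.slice x none (some 15)) " " "&nbsp;" ++ "...</div>") ++
    "<div class='line" ++ PySem.Int.toStr d ++ "'></div>" ++ pvGo d (y :: xs) 2 d :=
  pvGo_cons₂ d cls x y xs 1
lemma pvGoC2 (d cls : Int) (x y : String) (xs : List String) : pvGo d (x :: y :: xs) 2 cls =
    ("<div class='face" ++ PySem.Int.toStr cls ++ "'>" ++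
      PySem.Str.replace (PySem.Str.slice x none (some 15)) " " "&nbsp;" ++ "...</div>") ++
    "<div class='line" ++ PySem.Int.toStr d ++ "'></div>" ++ pvGo d (y :: xs) 1 d :=
  pvGo_cons₂ d cls x y xs 0

-- ===== VERDICT (by name: the statement is the Claim_ definition above) =====
theorem calculateTextToExCube_spec : Claim_equal_calculateTextToExCube := by
  intro fv divNum divExNum ifFirst divNumEx _
  unfold Spec_calculateTextToExCube
  rcases fv with _ | ⟨a, _ | ⟨b, _ | ⟨c, _ | ⟨d, rest⟩⟩⟩⟩
  · refine String.toList_inj.mp ?_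
    norm_num [calculateTextToExCube, calculateTextToExCube_alt, pvGo_nil]
  · refine String.toList_inj.mp ?_
    norm_num [calculateTextToExCube, calculateTextToExCube_alt, pvAStep, pvGoS4]
    all_goals (split_ifs <;> norm_num [pvDots, pvDots'])
  · refine String.toList_inj.mp ?_
    norm_num [calculateTextToExCube, calculateTextToExCube_alt, pvAStep, pvGoC4, pvGoS3]
    all_goals (split_ifs <;> norm_num [pvDots, pvDots'])
  · refine String.toList_inj.mp ?_
    norm_num [calculateTextToExCube, calculateTextToExCube_alt, pvAStep, pvGoC4, pvGoC3, pvGoS2]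
    all_goals (split_ifs <;> norm_num [pvDots, pvDots'])
  · refine String.toList_inj.mp ?_
    have hm4 : ¬ (((a :: b :: c :: d :: rest).length : Int) < 4) := by
      simp only [List.length_cons]; push_cast; omega
    simp only [calculateTextToExCube, calculateTextToExCube_alt,
      foldA_take _ _ _ _ _ (by simp : 4 ≤ (a :: b :: c :: d :: rest).length)]
    generalize hM : ((a :: b :: c :: d :: rest).length : Int) = M at hm4 ⊢
    norm_num [pvAStep, hm4, pvGoC4, pvGoC3, pvGoC2, pvGo_one]
    all_goals (split_ifs <;> norm_num [pvDots, pvDots'])
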